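-- pv_equiv track=rewrite | github.com/charlieqf/onlytrade | scripts/topic_stream/retained_feed_merge.py | _require_matching_identity
-- ===== SOURCE A (Python) =====
-- from typing import Any, Dict, List, Optional, Tuple
--
-- def _require_matching_identity(
--     existing_payload: Dict[str, Any], incoming_payload: Dict[str, Any]
-- ) -> Tuple[str, str]:
--     room_values = {
--         str(value).strip()
--         for value in (
--             existing_payload.get("room_id"),
--             incoming_payload.get("room_id"),
--         )
--         if str(value or "").strip()
--     }
--     program_values = {
--         str(value).strip()
--         for value in (
--             existing_payload.get("program_slug"),
--             incoming_payload.get("program_slug"),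
--         )
--         if str(value or "").strip()
--     }
--     if len(room_values) != 1 or len(program_values) != 1:
--         raise ValueError("room_id and program_slug must match")
--     return next(iter(room_values)), next(iter(program_values))
-- ===== SOURCE B (Python) =====
-- def _absorb(current, payload, key):
--     s = str(payload.get(key) or "").strip()
--     if not s:
--         return current
--     if current is not None and current != s:
--         raise ValueError("room_id and program_slug must match")
--     return s
--
--
-- def _require_matching_identity(existing_payload, incoming_payload):
--     room = None
--     program = None
--     for payload in (existing_payload, incoming_payload):
--         room = _absorb(room, payload, "room_id")
--         program = _absorb(program, payload, "program_slug")
--     if room is None or program is None: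
--         raise ValueError("room_id and program_slug must match")
--     return room, program
-- ===== Notes on version B (the rewrite author's own statement) =====
-- stated objective: alternative
-- what changed: Replaces A's per-field set comprehensions with set-cardinality checks by a single fold over the payload sequence that absorbs each payload's non-blank stripped values into two running accumulators, failing fast on the first conflict.
import Mathlib
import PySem

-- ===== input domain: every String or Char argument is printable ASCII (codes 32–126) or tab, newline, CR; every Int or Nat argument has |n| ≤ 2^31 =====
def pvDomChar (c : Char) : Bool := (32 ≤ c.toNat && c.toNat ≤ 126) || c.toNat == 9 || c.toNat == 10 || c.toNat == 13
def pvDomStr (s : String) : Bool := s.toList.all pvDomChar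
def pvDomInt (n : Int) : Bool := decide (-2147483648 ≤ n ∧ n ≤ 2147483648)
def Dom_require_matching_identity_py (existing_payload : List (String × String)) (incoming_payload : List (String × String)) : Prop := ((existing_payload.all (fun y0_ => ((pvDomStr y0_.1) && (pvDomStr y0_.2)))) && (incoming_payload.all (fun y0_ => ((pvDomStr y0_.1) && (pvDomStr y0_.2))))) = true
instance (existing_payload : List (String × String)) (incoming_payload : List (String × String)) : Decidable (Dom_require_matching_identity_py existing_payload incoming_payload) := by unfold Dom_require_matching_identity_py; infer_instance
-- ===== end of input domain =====

-- B replaces A's per-field set comprehensions + set-size counting by a single fold over the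
-- payload sequence that absorbs non-blank stripped values into two running accumulators,
-- failing fast on conflict (objective: alternative). Pre_ excludes exactly the inputs on
-- which A raises ValueError (mismatched or absent identity fields).


-- shared trivial helper: payload.get(key) on the association-list dict (first match)
def pvGet? (l : List (String × String)) (k : String) : Option String :=
  (PySem.Dict.mk l).get? k

-- ===== PORT A =====
-- str(value) for the Option value (str(None) = "None"; only reachable behind the truthiness filter)
def pvStrOfOpt : Option String → String
  | some s => s
  | none => "None"

-- one set comprehension: {str(v).strip() for v in (x, y) if str(v or "").strip()}
def pvSetOfPair (a b : Option String) : List String :=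
  PySem.Set.ofList
    (([a, b].filter (fun v => PySem.Str.strip (v.getD "") != "")).map
      (fun v => PySem.Str.strip (pvStrOfOpt v)))

def require_matching_identity_py (existing_payload : List (String × String)) (incoming_payload : List (String × String)) : String × String :=
  let room_values := pvSetOfPair (pvGet? existing_payload "room_id") (pvGet? incoming_payload "room_id")
  let program_values := pvSetOfPair (pvGet? existing_payload "program_slug") (pvGet? incoming_payload "program_slug")
  if room_values.length ≠ 1 ∨ program_values.length ≠ 1 then
    ("", "")  -- raise ValueError: excluded by Pre_
  else
    (room_values.headD "", program_values.headD "")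

-- ===== PORT B =====
-- _absorb(current, payload, key): skip blank, raise (= none) on conflict, else return s
def pvAbsorb (current : Option String) (payload : List (String × String)) (key : String) : Option (Option String) :=
  let s := PySem.Str.strip ((pvGet? payload key).getD "")
  if s = "" then some current
  else
    match current with
    | some c => if c ≠ s then none else some (some s)
    | none => some (some s)

-- the loop over (existing_payload, incoming_payload), error-propagating (none = raised)
def require_matching_identity_py_alt (existing_payload : List (String × String)) (incoming_payload : List (String × String)) : String × String :=
  let step := fun (st : Option (Option String × Option String)) (payload : List (String × String)) =>
    match st with
    | none => none
    | some (room, program) =>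
      match pvAbsorb room payload "room_id" with
      | none => none
      | some room' =>
        match pvAbsorb program payload "program_slug" with
        | none => none
        | some program' => some (room', program')
  match [existing_payload, incoming_payload].foldl step (some (none, none)) with
  | some (some r, some p) => (r, p)
  | _ => ("", "")  -- raise ValueError: excluded by Pre_

-- ===== PRECONDITION & SPEC =====
-- Pre-side normalization, self-contained (independent of the ports' helpers)
def pvNm (l : List (String × String)) (k : String) : Option String :=
  if PySem.Str.strip (((l.find? (fun p => p.1 == k)).map Prod.snd).getD "") = "" then none
  else some (PySem.Str.strip (((l.find? (fun p => p.1 == k)).map Prod.snd).getD ""))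

-- the field named k is reconcilable across the two payloads: at least one has a non-blank
-- value, and when both do the stripped values agree
def pvPreOk (e i : List (String × String)) (k : String) : Bool :=
  ((pvNm e k).isSome || (pvNm i k).isSome) &&
    ((pvNm e k).getD ((pvNm i k).getD "") == (pvNm i k).getD ((pvNm e k).getD ""))

-- Pre_ excludes exactly the inputs on which A raises ValueError (the two normalized room_id
-- values conflict or are both blank/absent, or likewise for program_slug)
def Pre_require_matching_identity_py (existing_payload : List (String × String)) (incoming_payload : List (String × String)) : Prop :=
  pvPreOk existing_payload incoming_payload "room_id" = true ∧
  pvPreOk existing_payload incoming_payload "program_slug" = true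

instance (existing_payload : List (String × String)) (incoming_payload : List (String × String)) : Decidable (Pre_require_matching_identity_py existing_payload incoming_payload) := by unfold Pre_require_matching_identity_py; infer_instance

def pvWitness_require_matching_identity_py : (List (String × String)) × (List (String × String)) :=
  ([("room_id", " r1 "), ("program_slug", "p")], [("room_id", "r1")])

def Spec_require_matching_identity_py (existing_payload : List (String × String)) (incoming_payload : List (String × String)) (out : String × String) : Prop := out = require_matching_identity_py_alt existing_payload incoming_payload
instance (existing_payload : List (String × String)) (incoming_payload : List (String × String)) (out : String × String) : Decidable (Spec_require_matching_identity_py existing_payload incoming_payload out) := by unfold Spec_require_matching_identity_py; infer_instance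

-- ===== CLAIM (what is proved, stated in full; the proofs are below) =====
def Claim_equal_require_matching_identity_py : Prop := ∀ (existing_payload : List (String × String)) (incoming_payload : List (String × String)), Dom_require_matching_identity_py existing_payload incoming_payload → Pre_require_matching_identity_py existing_payload incoming_payload → Spec_require_matching_identity_py existing_payload incoming_payload (require_matching_identity_py existing_payload incoming_payload)

-- ===== LEMMAS AND PROOFS =====

-- normalization of one option: s = str(v or "").strip(); s if s else None
def pvNormOpt (v : Option String) : Option String :=
  let s := PySem.Str.strip (v.getD "")
  if s = "" then none else some s

def pvNorm (payload : List (String × String)) (key : String) : Option String :=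
  pvNormOpt (pvGet? payload key)

-- proof-side reconciliation of two normalized options (none = no consistent value)
def pvResolve : Option String → Option String → Option String
  | some x, some y => if x = y then some x else none
  | some x, none => some x
  | none, b => b

-- proof-side abstraction of the reconcilability test on the two normalized options
def pvOkB : Option String → Option String → Bool
  | some x, some y => x == y
  | none, none => false
  | _, _ => true

-- absorb expressed on the normalized option
def pvAbsorbO : Option String → Option String → Option (Option String)
  | cur, none => some cur
  | cur, some s =>
    match cur with
    | some c => if c ≠ s then none else some (some s)
    | none => some (some s)

lemma pvStrip_empty : PySem.Str.strip "" = "" := by decide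

lemma pvGet?_eq_find? (l : List (String × String)) (k : String) :
    pvGet? l k = (l.find? (fun p => p.1 == k)).map Prod.snd := by
  induction l with
  | nil => rfl
  | cons hd tl ih =>
    obtain ⟨k1, v1⟩ := hd
    simp only [pvGet?, PySem.Dict.get?_mk_cons, List.find?] at *
    by_cases h : k1 = k
    · subst h; simp_all
    · have hb : (k1 == k) = false := beq_eq_false_iff_ne.mpr h
      rw [hb] at *
      simp_all

lemma pvNm_eq_pvNorm (l : List (String × String)) (k : String) :
    pvNm l k = pvNorm l k := by
  simp only [pvNm, pvNorm, pvNormOpt, pvGet?_eq_find?]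

lemma pvOkB_eq_formula (a b : Option String) :
    ((a.isSome || b.isSome) && (a.getD (b.getD "") == b.getD (a.getD ""))) = pvOkB a b := by
  cases a <;> cases b <;> simp [pvOkB]

lemma pvPreOk_eq_pvOkB (e i : List (String × String)) (k : String) :
    pvPreOk e i k = pvOkB (pvNorm e k) (pvNorm i k) := by
  unfold pvPreOk
  rw [pvNm_eq_pvNorm, pvNm_eq_pvNorm, pvOkB_eq_formula]

lemma pvOk_iff_resolve_isSome (a b : Option String) : pvOkB a b = true ↔ (pvResolve a b).isSome := by
  cases a <;> cases b <;> simp [pvOkB, pvResolve, apply_ite Option.isSome]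

lemma pvSetOfPair_eq (a b : Option String) :
    pvSetOfPair a b = PySem.Set.ofList ((pvNormOpt a).toList ++ (pvNormOpt b).toList) := by
  cases a <;> cases b <;>
    simp [pvSetOfPair, pvNormOpt, pvStrOfOpt, List.filter_cons, pvStrip_empty, bne_iff_ne] <;>
    split_ifs <;> simp_all

lemma pvSetOfPair_eq_of_resolve (a b : Option String) (x : String)
    (h : pvResolve (pvNormOpt a) (pvNormOpt b) = some x) :
    pvSetOfPair a b = [x] := by
  rw [pvSetOfPair_eq]
  cases hA : pvNormOpt a <;> cases hB : pvNormOpt b <;> rw [hA, hB] at h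
  · simp [pvResolve] at h
  · simp only [pvResolve, Option.some.injEq] at h; subst h; rfl
  · simp only [pvResolve, Option.some.injEq] at h; subst h; rfl
  · rename_i y z
    simp only [pvResolve] at h
    split_ifs at h with hxy
    · cases h; subst hxy
      simp [PySem.Set.ofList, PySem.Set.add, PySem.Set.contains, List.foldl]

lemma pvAbsorb_eq (cur : Option String) (p : List (String × String)) (k : String) :
    pvAbsorb cur p k = pvAbsorbO cur (pvNorm p k) := by
  simp only [pvAbsorb, pvNorm, pvNormOpt]
  split_ifs with h <;> cases cur <;> simp [pvAbsorbO]

lemma pvAbsorbO_none (a : Option String) : pvAbsorbO none a = some a := by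
  cases a <;> rfl

lemma pvAbsorbO_of_resolve (a b : Option String) (x : String)
    (h : pvResolve a b = some x) : pvAbsorbO a b = some (some x) := by
  cases a <;> cases b <;> simp_all [pvResolve, pvAbsorbO]

-- ===== VERDICT (by name: the statement is the Claim_ definition above) =====
theorem require_matching_identity_py_spec : Claim_equal_require_matching_identity_py := by
  intro e i _dom hpre
  obtain ⟨h1, h2⟩ := hpre
  rw [pvPreOk_eq_pvOkB, pvOk_iff_resolve_isSome] at h1 h2
  obtain ⟨r, hr⟩ := Option.isSome_iff_exists.mp h1
  obtain ⟨p, hp⟩ := Option.isSome_iff_exists.mp h2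
  unfold Spec_require_matching_identity_py require_matching_identity_py require_matching_identity_py_alt
  have hAr : pvSetOfPair (pvGet? e "room_id") (pvGet? i "room_id") = [r] :=
    pvSetOfPair_eq_of_resolve _ _ _ hr
  have hAp : pvSetOfPair (pvGet? e "program_slug") (pvGet? i "program_slug") = [p] :=
    pvSetOfPair_eq_of_resolve _ _ _ hp
  simp only [List.foldl, pvAbsorb_eq, pvAbsorbO_none,
    pvAbsorbO_of_resolve _ _ _ hr, pvAbsorbO_of_resolve _ _ _ hp, hAr, hAp]
  simp
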